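-- pv_equiv track=rewrite | github.com/jainil15/ISPracticals | prac5.py | create_tupples
-- ===== SOURCE A (Python) =====
-- def create_tupples(plaintext):
--     tupples = []
--     i = 0
--     while i < len(plaintext):
--         if (i + 1) < len(plaintext):
--             tupples.append((plaintext[i], plaintext[i + 1]))
--             i += 2
--         else:
--             tupples.append((plaintext[i], 'x'))
--             i += 1
--
--     return tupples
-- ===== SOURCE B (Python) =====
-- def create_tupples(plaintext):
--     pairs = list(zip(plaintext[::2], plaintext[1::2]))
--     if len(plaintext) % 2:
--         pairs.append((plaintext[-1], 'x'))
--     return pairs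
-- ===== Notes on version B (the rewrite author's own statement) =====
-- stated objective: idiomatic
-- what changed: Replaces the index-walking while loop with zip over the two strided slices plaintext[::2] and plaintext[1::2] plus a parity-checked tail pad with plaintext[-1]; C-level slicing/zip removes the per-character Python loop.
import Mathlib
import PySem

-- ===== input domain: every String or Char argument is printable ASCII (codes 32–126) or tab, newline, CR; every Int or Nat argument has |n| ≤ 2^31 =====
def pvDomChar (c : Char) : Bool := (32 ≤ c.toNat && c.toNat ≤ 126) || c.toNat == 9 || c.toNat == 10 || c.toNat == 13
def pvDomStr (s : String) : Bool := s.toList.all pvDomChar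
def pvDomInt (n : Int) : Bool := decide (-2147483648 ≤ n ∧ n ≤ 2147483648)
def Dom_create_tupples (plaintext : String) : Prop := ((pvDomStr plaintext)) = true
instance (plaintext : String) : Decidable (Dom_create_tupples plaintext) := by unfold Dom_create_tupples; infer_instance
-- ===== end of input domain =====

-- B replaces A's index-walking while loop by zip over the two strided slices s[::2] and
-- s[1::2] plus a parity-checked tail pad (objective: idiomatic; same O(n) cost).

-- ===== PORT A =====
-- A's while loop consumes two characters per normal step, one at the very end;
-- this recursion is that loop, step for step.
def createTupplesGoA : List Char → List (String × String)
  | [] => []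
  | [a] => [(String.ofList [a], "x")]
  | a :: b :: r => (String.ofList [a], String.ofList [b]) :: createTupplesGoA r

def create_tupples (plaintext : String) : List (String × String) :=
  createTupplesGoA plaintext.toList

-- ===== PORT B =====
def create_tupples_alt (plaintext : String) : List (String × String) :=
  let l := plaintext.toList
  -- plaintext[::2] and plaintext[1::2] (step 2 ≠ 0, so slice? always returns some)
  let evens := (PySem.List.slice? l none none 2).getD []
  let odds := (PySem.List.slice? l (some 1) none 2).getD []
  let pairs := (List.zip evens odds).map (fun p => (String.ofList [p.1], String.ofList [p.2]))
  if l.length % 2 = 1 then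
    -- plaintext[-1]; the parity guard makes l nonempty here, so pyGet? is some
    match PySem.List.pyGet? l (-1) with
    | some c => pairs ++ [(String.ofList [c], "x")]
    | none => pairs
  else
    pairs

-- ===== PRECONDITION & SPEC =====
def Spec_create_tupples (plaintext : String) (out : List (String × String)) : Prop := out = create_tupples_alt plaintext
instance (plaintext : String) (out : List (String × String)) : Decidable (Spec_create_tupples plaintext out) := by unfold Spec_create_tupples; infer_instance

-- ===== CLAIM (what is proved, stated in full; the proofs are below) =====
def Claim_equal_create_tupples : Prop := ∀ (plaintext : String), Dom_create_tupples plaintext → Spec_create_tupples plaintext (create_tupples plaintext)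

-- ===== LEMMAS AND PROOFS =====

-- every second element, starting at the head: what s[::2] yields
def stride2 {α : Type} : List α → List α
  | [] => []
  | [a] => [a]
  | a :: _ :: r => a :: stride2 r

theorem stride2_cons {α : Type} (b : α) (r : List α) :
    stride2 (b :: r) = b :: stride2 r.tail := by
  cases r <;> simp [stride2]

theorem filterMap_range_stride2 {α : Type} (xs : List α) (n : Nat)
    (h : n = (xs.length + 1) / 2) :
    (List.range n).filterMap (fun k => xs[2 * k]?) = stride2 xs := by
  induction xs using stride2.induct generalizing n with
  | case1 => subst h; simp [stride2]
  | case2 a => subst h; simp [stride2, List.range_succ]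
  | case3 a b r ih =>
    have hn : n = ((r.length + 1) / 2) + 1 := by subst h; simp; omega
    subst hn
    rw [List.range_succ_eq_map, List.filterMap_cons]
    simp only [List.filterMap_map]
    have : (fun k => (a :: b :: r)[2 * (k + 1)]?) = (fun k : Nat => r[2 * k]?) := by
      funext k
      have : 2 * (k + 1) = 2 * k + 2 := by omega
      simp [this]
    simp [stride2, Nat.mul_add]
    exact ih _ rfl

theorem slice2_none (xs : List Char) :
    PySem.List.slice? xs none none 2 = some (stride2 xs) := by
  simp only [PySem.List.slice?, PySem.List.sliceIndices]
  norm_num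
  have hc : (if 0 < xs.length then ((((xs.length : Int)) + 2 - 1) / 2).toNat else 0)
      = (xs.length + 1) / 2 := by split <;> omega
  have hf : (fun x : Nat => xs[(2 * (x : Int)).toNat]?) = (fun x => xs[2 * x]?) := by
    funext x
    have h1 : (2 * (x : Int)).toNat = 2 * x := by omega
    rw [h1]
  rw [hc, hf]
  exact filterMap_range_stride2 xs _ rfl

theorem slice2_one (xs : List Char) :
    PySem.List.slice? xs (some 1) none 2 = some (stride2 xs.tail) := by
  simp only [PySem.List.slice?, PySem.List.sliceIndices]
  norm_num
  cases xs with
  | nil => simp [stride2]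
  | cons a r =>
    have hm : min 1 (((a :: r).length : Int)) = 1 := by
      simp only [List.length_cons]; omega
    have hf : (fun x : Nat => (a :: r)[(1 + 2 * (x : Int)).toNat]?)
        = (fun x => r[2 * x]?) := by
      funext x
      have h1 : (1 + 2 * (x : Int)).toNat = 2 * x + 1 := by omega
      simp [h1]
    rw [hm]
    rw [show (if 1 < (a :: r).length
          then ((((a :: r).length : Int) - 1 + 2 - 1) / 2).toNat else 0)
        = (r.length + 1) / 2 by simp only [List.length_cons]; split <;> omega]
    rw [hf]
    rw [filterMap_range_stride2 r _ rfl]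
    rfl

theorem pyGet?_neg_one {α : Type} (l : List α) :
    PySem.List.pyGet? l (-1) = l.getLast? := by
  simp [PySem.List.pyGet?, PySem.List.pyIdx?]
  cases l with
  | nil => simp
  | cons a r => simp [List.getLast?_eq_getElem?]

theorem goA_eq_zip (l : List Char) :
    createTupplesGoA l =
      (let pairs := ((stride2 l).zip (stride2 l.tail)).map
          (fun p => (String.ofList [p.1], String.ofList [p.2]))
       if l.length % 2 = 1 then
         match PySem.List.pyGet? l (-1) with
         | some c => pairs ++ [(String.ofList [c], "x")]
         | none => pairs
       else pairs) := by
  induction l using stride2.induct with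
  | case1 => simp [createTupplesGoA, stride2]
  | case2 a => simp [createTupplesGoA, stride2, pyGet?_neg_one]
  | case3 a b r ih =>
    simp only [createTupplesGoA, stride2, List.tail_cons, stride2_cons,
      List.zip_cons_cons, List.map_cons, List.length_cons]
    rw [ih]
    have hmod : (r.length + 1 + 1) % 2 = r.length % 2 := by omega
    rw [hmod]
    by_cases h : r.length % 2 = 1
    · have hr : r ≠ [] := by intro he; subst he; simp at h
      have hlast : PySem.List.pyGet? (a :: b :: r) (-1) = PySem.List.pyGet? r (-1) := by
        rw [pyGet?_neg_one, pyGet?_neg_one]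
        cases hg : r.getLast? with
        | none => exact absurd (List.getLast?_eq_none_iff.mp hg) hr
        | some x => simp [List.getLast?_cons, hg]
      simp only [h, hlast]
      cases hg : PySem.List.pyGet? r (-1) <;> simp
    · simp [h]

-- ===== VERDICT (by name: the statement is the Claim_ definition above) =====
theorem create_tupples_spec : Claim_equal_create_tupples := by
  intro s _
  unfold Spec_create_tupples create_tupples create_tupples_alt
  simp only [slice2_none, slice2_one, Option.getD_some]
  exact goA_eq_zip s.toList
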